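-- pv_equiv track=rewrite | github.com/zih2o/Algorithm-Study | programmers/pccp/hsj/외톨이 알파벳.py | solution
-- ===== SOURCE A (Python) =====
-- def solution(input_string):
--     answer = []
--     temp_list = []
--     temp = '' #z
--
--     for i in range(len(input_string)):
--         if temp == input_string[i]:
--             continue
--         elif temp != input_string[i]:
--             if input_string[i] in temp_list:
--                 temp = input_string[i]
--                 temp_list.remove(input_string[i])
--                 answer.append(input_string[i])
--
--             else:
--                 temp_list.append(input_string[i])
--                 temp = input_string[i]
--     answer = list(set(answer))
--     answer.sort()
--     if len(answer) == 0: return 'N'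
--     return ''.join(answer)
-- ===== SOURCE B (Python) =====
-- from itertools import groupby
-- from collections import Counter
--
--
-- def solution(input_string):
--     # count maximal runs per character; lonely = chars with >= 2 runs
--     run_counts = Counter(k for k, _ in groupby(input_string))
--     lonely = sorted(c for c in run_counts if run_counts[c] >= 2)
--     return ''.join(lonely) if lonely else 'N'
-- ===== Notes on version B (the rewrite author's own statement) =====
-- stated objective: simpler
-- what changed: A maintains an in/remove toggle list while scanning characters one by one and collects a char each time it restarts a run it has seen before; B reduces the string to its run leaders with itertools.groupby, counts them with Counter, and selects characters with at least two runs.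
import Mathlib
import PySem

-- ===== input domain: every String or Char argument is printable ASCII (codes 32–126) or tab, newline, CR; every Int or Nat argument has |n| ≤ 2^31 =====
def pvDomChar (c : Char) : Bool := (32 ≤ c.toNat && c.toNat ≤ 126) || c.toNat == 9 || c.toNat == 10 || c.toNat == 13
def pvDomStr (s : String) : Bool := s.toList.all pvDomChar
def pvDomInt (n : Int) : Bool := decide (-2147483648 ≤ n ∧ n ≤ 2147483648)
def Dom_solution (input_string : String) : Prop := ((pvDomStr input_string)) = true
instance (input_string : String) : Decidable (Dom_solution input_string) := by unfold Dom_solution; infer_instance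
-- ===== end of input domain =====

-- B replaces A's incremental membership-toggle over characters by groupby-run-leaders + Counter + filter (simpler decomposition, same cost).

-- ===== PORT A =====
-- loop body of A: state = (answer, temp_list, temp); Python's temp = '' is modelled as none (it never equals a character)
def solAStep (st : List Char × List Char × Option Char) (c : Char) :
    List Char × List Char × Option Char :=
  if st.2.2 = some c then st
  else if st.2.1.contains c then
    (st.1 ++ [c], (PySem.List.remove? st.2.1 c).getD st.2.1, some c)
  else
    (st.1, st.2.1 ++ [c], some c)

def solution (input_string : String) : String :=
  if (PySem.List.sorted
        (PySem.Set.ofList (input_string.toList.foldl solAStep ([], [], none)).1)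
        (fun x => x) false).length = 0 then "N"
  else String.ofList (PySem.List.sorted
        (PySem.Set.ofList (input_string.toList.foldl solAStep ([], [], none)).1)
        (fun x => x) false)

-- ===== PORT B =====
-- keys of itertools.groupby: one leader per maximal run
def leaders : List Char → List Char
  | [] => []
  | c :: cs => c :: leaders (cs.dropWhile (· == c))
  termination_by l => l.length
  decreasing_by exact Nat.lt_succ_of_le (List.length_dropWhile_le _ _)

def solution_alt (input_string : String) : String :=
  if (PySem.List.sorted
        ((PySem.Dict.counter (leaders input_string.toList)).keys.filter
          (fun c => 2 ≤ (PySem.Dict.counter (leaders input_string.toList)).getD c 0))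
        (fun x => x) false) = [] then "N"
  else String.ofList (PySem.List.sorted
        ((PySem.Dict.counter (leaders input_string.toList)).keys.filter
          (fun c => 2 ≤ (PySem.Dict.counter (leaders input_string.toList)).getD c 0))
        (fun x => x) false)

-- ===== PRECONDITION & SPEC =====
def Spec_solution (input_string : String) (out : String) : Prop := out = solution_alt input_string
instance (input_string : String) (out : String) : Decidable (Spec_solution input_string out) := by unfold Spec_solution; infer_instance

-- ===== CLAIM (what is proved, stated in full; the proofs are below) =====
def Claim_equal_solution : Prop := ∀ (input_string : String), Dom_solution input_string → Spec_solution input_string (solution input_string)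

-- ===== LEMMAS AND PROOFS =====

-- the sequence of characters A actually processes (the temp-skip removes run repeats)
def collapse : Option Char → List Char → List Char
  | _, [] => []
  | t, c :: cs => if t = some c then collapse t cs else c :: collapse (some c) cs

-- A's non-skipping step, with temp dropped
def toggle (st : List Char × List Char) (c : Char) : List Char × List Char :=
  if st.2.contains c then (st.1 ++ [c], (PySem.List.remove? st.2 c).getD st.2)
  else (st.1, st.2 ++ [c])

lemma foldA_eq (cs : List Char) : ∀ (a tl : List Char) (t : Option Char),
    (cs.foldl solAStep (a, tl, t)).1 = ((collapse t cs).foldl toggle (a, tl)).1 := by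
  induction cs with
  | nil => intro a tl t; simp [collapse]
  | cons c cs ih =>
    intro a tl t
    by_cases h : t = some c
    · rw [List.foldl_cons, show solAStep (a, tl, t) c = (a, tl, t) from by simp [solAStep, h],
        show collapse t (c :: cs) = collapse t cs from by rw [collapse, if_pos h]]
      exact ih a tl t
    · rw [show collapse t (c :: cs) = c :: collapse (some c) cs from by rw [collapse, if_neg h],
        List.foldl_cons, List.foldl_cons]
      by_cases hm : tl.contains c
      · have hcm : c ∈ tl := by simpa using hm
        rw [show solAStep (a, tl, t) c = (a ++ [c], (PySem.List.remove? tl c).getD tl, some c)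
              from by simp [solAStep, h, hcm],
            show toggle (a, tl) c = (a ++ [c], (PySem.List.remove? tl c).getD tl)
              from by simp [toggle, hcm]]
        exact ih _ _ _
      · have hcm : c ∉ tl := by simpa using hm
        rw [show solAStep (a, tl, t) c = (a, tl ++ [c], some c) from by simp [solAStep, h, hcm],
            show toggle (a, tl) c = (a, tl ++ [c]) from by simp [toggle, hcm]]
        exact ih _ _ _

lemma collapse_some (c : Char) :
    ∀ cs, collapse (some c) cs = collapse none (cs.dropWhile (· == c)) := by
  intro cs; induction cs with
  | nil => simp [collapse]
  | cons d cs ih =>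
    by_cases h : d = c
    · subst h
      rw [show collapse (some d) (d :: cs) = collapse (some d) cs from by
            rw [collapse, if_pos rfl],
          List.dropWhile_cons_of_pos (by simp)]
      exact ih
    · have h1 : ¬ (some c = some d) := by
        intro hh; exact h (Option.some.injEq .. ▸ hh.symm ▸ rfl)
      have h2 : ¬ ((none : Option Char) = some d) := by simp
      rw [List.dropWhile_cons_of_neg (by simp [h]),
          show collapse (some c) (d :: cs) = d :: collapse (some d) cs from by
            rw [collapse, if_neg h1],
          show collapse none (d :: cs) = d :: collapse (some d) cs from by
            rw [collapse, if_neg h2]]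

lemma collapse_none_eq_leaders_aux :
    ∀ n (cs : List Char), cs.length ≤ n → collapse none cs = leaders cs := by
  intro n; induction n with
  | zero =>
    intro cs h
    cases cs with
    | nil => simp [collapse, leaders]
    | cons c cs => simp at h
  | succ n ih =>
    intro cs h
    cases cs with
    | nil => simp [collapse, leaders]
    | cons c cs =>
      rw [show collapse none (c :: cs) = c :: collapse (some c) cs from by
            rw [collapse, if_neg (by simp)],
          collapse_some, leaders]
      have hlen : (cs.dropWhile (· == c)).length ≤ n :=
        le_trans (List.length_dropWhile_le _ _) (by simpa using Nat.le_of_succ_le_succ h)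
      rw [ih _ hlen]

lemma collapse_none_eq_leaders (cs : List Char) : collapse none cs = leaders cs :=
  collapse_none_eq_leaders_aux cs.length cs le_rfl

lemma mem_toggle_fold : ∀ (L a tl : List Char) (c : Char),
    (c ∈ (L.foldl toggle (a, tl)).1) ↔ c ∈ a ∨ 2 ≤ L.count c + (if c ∈ tl then 1 else 0) := by
  intro L; induction L with
  | nil =>
    intro a tl c
    simp only [List.foldl_nil, List.count_nil, Nat.zero_add]
    constructor
    · exact Or.inl
    · rintro (h | h)
      · exact h
      · exfalso; split at h <;> omega
  | cons d L ih =>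
    intro a tl c
    rw [List.foldl_cons]
    by_cases hm : tl.contains d
    · have hmem : d ∈ tl := by simpa using hm
      rw [show toggle (a, tl) d = (a ++ [d], tl.erase d) from by
            simp [toggle, hmem, PySem.List.remove?_eq_some_erase tl d hmem], ih]
      by_cases hc : c = d
      · subst hc
        rw [List.count_cons_self, if_pos hmem]
        constructor
        · intro _; exact Or.inr (by omega)
        · intro _; exact Or.inl (by simp)
      · have hdc : ¬ d = c := fun hh => hc hh.symm
        simp [List.mem_append, hc, List.mem_erase_of_ne hc, hdc]
    · have hnmem : d ∉ tl := by simpa using hm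
      rw [show toggle (a, tl) d = (a, tl ++ [d]) from by simp [toggle, hnmem], ih]
      by_cases hc : c = d
      · subst hc
        rw [List.count_cons_self, if_neg hnmem, if_pos (show c ∈ tl ++ [c] by simp)]
      · have hdc : ¬ d = c := fun hh => hc hh.symm
        simp [List.mem_append, hc, hdc]

lemma answer_eq (s : String) :
    PySem.List.sorted (PySem.Set.ofList (s.toList.foldl solAStep ([], [], none)).1)
        (fun x => x) false
      = PySem.List.sorted ((PySem.Dict.counter (leaders s.toList)).keys.filter
          (fun c => 2 ≤ (PySem.Dict.counter (leaders s.toList)).getD c 0)) (fun x => x) false := by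
  rw [PySem.List.sorted_id_eq_sorted_id_iff_perm,
      List.perm_ext_iff_of_nodup (PySem.Set.nodup_ofList _)
        ((PySem.Dict.nodup_keys_counter _).filter _)]
  intro c
  rw [PySem.Set.mem_ofList, foldA_eq, collapse_none_eq_leaders, mem_toggle_fold]
  simp [List.mem_filter, PySem.Dict.keys_counter, PySem.Set.mem_ofList, PySem.Dict.getD_counter]
  intro h
  exact List.count_pos_iff.mp (by omega)

-- ===== VERDICT (by name: the statement is the Claim_ definition above) =====
theorem solution_spec : Claim_equal_solution := by
  intro s _
  unfold Spec_solution solution solution_alt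
  rw [answer_eq s]
  by_cases h : (PySem.List.sorted ((PySem.Dict.counter (leaders s.toList)).keys.filter
      (fun c => 2 ≤ (PySem.Dict.counter (leaders s.toList)).getD c 0)) (fun x => x) false) = []
  · rw [if_pos (by rw [h]; rfl), if_pos h]
  · rw [if_neg (fun hh => h (List.length_eq_zero_iff.mp hh)), if_neg h]
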